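-- pv_equiv track=rewrite | github.com/allefant/moosader-compo-7 | src/parse_utils.py | trans_part
-- ===== SOURCE A (Python) =====
-- def trans_part(row):
--     newrow = ""
--     left = 0
--     right = len(row) - 1
--     inside = False
--     while left <= right and row[left] == " ": left += 1
--     while right >= 0 and row[right] == " ": right -= 1
--     for i, c in enumerate(row):
--         if i >= left and i <= right:
--             if inside:
--                 if c != " ": inside = False
--             else:
--                 if c == " ": c = "e"
--                 if c == chr(0):
--                     inside = True
--                     c = " "
--         newrow += c
--     return newrow
-- ===== SOURCE B (Python) =====
-- def trans_part(row):
--     # Dom excludes chr(0), so the NUL-toggle branch of A never fires: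
--     # the row is leading spaces + core + trailing spaces, and only the
--     # core's spaces become 'e'.
--     core = row.strip(" ")
--     left = len(row) - len(row.lstrip(" "))
--     return " " * left + core.replace(" ", "e") + " " * (len(row) - left - len(core))
-- ===== Notes on version B (the rewrite author's own statement) =====
-- stated objective: simpler
-- what changed: Replaces the index-bound while-loops and the per-character enumerate state machine by a closed-form strip/replace: core = row.strip(' '), spaces in the core become 'e', the space padding is rebuilt verbatim (the NUL-toggle branch is unreachable on the printable-ASCII domain).
import Mathlib
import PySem

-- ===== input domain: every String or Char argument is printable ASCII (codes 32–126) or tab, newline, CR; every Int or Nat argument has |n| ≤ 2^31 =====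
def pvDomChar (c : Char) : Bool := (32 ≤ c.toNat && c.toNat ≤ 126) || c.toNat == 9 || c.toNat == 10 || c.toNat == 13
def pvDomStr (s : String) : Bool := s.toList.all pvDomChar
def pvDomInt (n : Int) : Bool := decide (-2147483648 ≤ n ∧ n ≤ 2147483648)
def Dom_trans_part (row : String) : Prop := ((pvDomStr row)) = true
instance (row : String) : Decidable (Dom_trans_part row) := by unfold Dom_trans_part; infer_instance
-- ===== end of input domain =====

-- B replaces A's while-loops and enumerate state machine by a closed-form strip/replace
-- (simpler); on the printable-ASCII domain A's chr(0) toggle never fires.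

-- ===== PORT A =====
-- while left <= right and row[left] == " ": left += 1
def transLeftLoop (cs : List Char) (left right : Int) : Int :=
  if left ≤ right ∧ (PySem.List.pyGet? cs left).getD 'x' = ' ' then
    transLeftLoop cs (left + 1) right
  else left
termination_by (right + 1 - left).toNat
decreasing_by omega

-- while right >= 0 and row[right] == " ": right -= 1
def transRightLoop (cs : List Char) (right : Int) : Int :=
  if 0 ≤ right ∧ (PySem.List.pyGet? cs right).getD 'x' = ' ' then
    transRightLoop cs (right - 1)
  else right
termination_by (right + 1).toNat
decreasing_by omega

-- body of the `for i, c in enumerate(row)` loop; state = (newrow, inside)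
def transStep (left right : Int) (st : List Char × Bool) (p : Int × Char) : List Char × Bool :=
  if left ≤ p.1 ∧ p.1 ≤ right then
    if st.2 then
      if p.2 ≠ ' ' then (st.1 ++ [p.2], false) else (st.1 ++ [p.2], st.2)
    else
      let c1 := if p.2 = ' ' then 'e' else p.2
      if c1 = Char.ofNat 0 then (st.1 ++ [' '], true) else (st.1 ++ [c1], false)
  else (st.1 ++ [p.2], st.2)

def trans_part (row : String) : String :=
  let cs := row.toList
  let left := transLeftLoop cs 0 ((cs.length : Int) - 1)
  let right := transRightLoop cs ((cs.length : Int) - 1)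
  let res := (PySem.List.enumerate cs 0).foldl (transStep left right) ([], false)
  String.ofList res.1

-- ===== PORT B =====
def spaceP (c : Char) : Bool := c == ' '

def trans_part_alt (row : String) : String :=
  let cs := row.toList
  let core := ((cs.dropWhile spaceP).reverse.dropWhile spaceP).reverse
  let left := cs.length - (cs.dropWhile spaceP).length
  String.ofList (List.replicate left ' '
    ++ core.map (fun c => if c == ' ' then 'e' else c)
    ++ List.replicate (cs.length - left - core.length) ' ')

-- ===== PRECONDITION & SPEC =====
def Spec_trans_part (row : String) (out : String) : Prop := out = trans_part_alt row
instance (row : String) (out : String) : Decidable (Spec_trans_part row out) := by unfold Spec_trans_part; infer_instance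

-- ===== CLAIM (what is proved, stated in full; the proofs are below) =====
def Claim_equal_trans_part : Prop := ∀ (row : String), Dom_trans_part row → Spec_trans_part row (trans_part row)

-- ===== LEMMAS AND PROOFS =====

-- per-index emission function characterising A's main loop when `inside` stays false
def emitA (left right : Int) : Int → List Char → List Char
  | _, [] => []
  | i, c :: t =>
    (if left ≤ i ∧ i ≤ right then (if c = ' ' then 'e' else c) else c) :: emitA left right (i + 1) t

lemma emitA_append (left right i : Int) (xs ys : List Char) :
    emitA left right i (xs ++ ys) = emitA left right i xs ++ emitA left right (i + xs.length) ys := by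
  induction xs generalizing i with
  | nil => simp [emitA]
  | cons x t ih => simp [emitA, ih (i + 1)]; ring_nf

lemma emitA_id_left (left right : Int) (xs : List Char) (i : Int)
    (h : i + xs.length ≤ left) : emitA left right i xs = xs := by
  induction xs generalizing i with
  | nil => simp [emitA]
  | cons x t ih =>
    simp only [List.length_cons] at h
    have : ¬ (left ≤ i ∧ i ≤ right) := by push_cast at h ⊢; omega
    simp [emitA, this, ih (i + 1) (by push_cast at h ⊢; omega)]

lemma emitA_id_right (left right : Int) (xs : List Char) (i : Int)
    (h : right < i) : emitA left right i xs = xs := by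
  induction xs generalizing i with
  | nil => simp [emitA]
  | cons x t ih =>
    have : ¬ (left ≤ i ∧ i ≤ right) := by omega
    simp [emitA, this, ih (i + 1) (by omega)]

lemma emitA_map (left right : Int) (xs : List Char) (i : Int)
    (h1 : left ≤ i) (h2 : i + xs.length ≤ right + 1) :
    emitA left right i xs = xs.map (fun c => if c == ' ' then 'e' else c) := by
  induction xs generalizing i with
  | nil => simp [emitA]
  | cons x t ih =>
    simp only [List.length_cons] at h2
    have hin : left ≤ i ∧ i ≤ right := by push_cast at h2 ⊢; omega
    have IH := ih (i + 1) (by omega) (by push_cast at h2 ⊢; omega)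
    simp only [emitA, hin, and_self, if_true, List.map_cons, IH]
    by_cases hx : x = ' ' <;> simp [hx]

-- A's fold, when no chr(0) occurs, is `emitA`
lemma fold_eq_emitA (left right : Int) (xs : List Char)
    (hx : ∀ c ∈ xs, c ≠ Char.ofNat 0) :
    ∀ (i : Int) (acc : List Char),
      (PySem.List.enumerate xs i).foldl (transStep left right) (acc, false)
        = (acc ++ emitA left right i xs, false) := by
  induction xs with
  | nil => intro i acc; simp [PySem.List.enumerate_nil, emitA]
  | cons x t ih =>
    intro i acc
    have hx0 : x ≠ Char.ofNat 0 := hx x (by simp)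
    have hxt : ∀ c ∈ t, c ≠ Char.ofNat 0 := fun c hc => hx c (by simp [hc])
    rw [PySem.List.enumerate_cons, List.foldl_cons]
    by_cases hin : left ≤ i ∧ i ≤ right
    · by_cases hsp : x = ' '
      · have he : ('e' : Char) ≠ Char.ofNat 0 := by decide
        simp [transStep, hin, hsp, ih hxt, emitA]
      · simp [transStep, hin, hsp, hx0, ih hxt, emitA]
    · simp [transStep, hin, ih hxt, emitA]

-- the first while loop computes the length of the leading-space prefix
lemma leftLoop_eq_aux (n : Nat) : ∀ (cs : List Char) (k : Nat), cs.length ≤ k + n →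
    transLeftLoop cs (k : Int) ((cs.length : Int) - 1)
      = (k : Int) + (((cs.drop k).takeWhile spaceP).length : Int) := by
  induction n with
  | zero =>
    intro cs k hk
    rw [transLeftLoop]
    rw [if_neg (by rintro ⟨h1, -⟩; omega)]
    have : cs.drop k = [] := List.drop_eq_nil_of_le (by omega)
    simp [this]
  | succ n ih =>
    intro cs k hk
    by_cases hlen : cs.length ≤ k
    · rw [transLeftLoop]
      rw [if_neg (by rintro ⟨h1, -⟩; omega)]
      have : cs.drop k = [] := List.drop_eq_nil_of_le (by omega)
      simp [this]
    · push_neg at hlen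
      have hget : PySem.List.pyGet? cs (k : Int) = some cs[k] :=
        PySem.List.pyGet?_ofNat _ _ hlen
      have hdrop : cs.drop k = cs[k] :: cs.drop (k + 1) := List.drop_eq_getElem_cons hlen
      rw [transLeftLoop]
      by_cases hsp : cs[k] = ' '
      · have hcond : ((k : Int) ≤ (cs.length : Int) - 1 ∧
            (PySem.List.pyGet? cs (k : Int)).getD 'x' = ' ') := by
          refine ⟨by omega, ?_⟩
          rw [hget]; simpa using hsp
        rw [if_pos hcond]
        have : ((k : Int) + 1) = ((k + 1 : Nat) : Int) := by push_cast; omega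
        rw [this, ih cs (k + 1) (by omega)]
        rw [hdrop, List.takeWhile_cons, if_pos (by simp [spaceP, hsp])]
        simp only [List.length_cons]
        push_cast; omega
      · have hcond : ¬ ((k : Int) ≤ (cs.length : Int) - 1 ∧
            (PySem.List.pyGet? cs (k : Int)).getD 'x' = ' ') := by
          intro ⟨_, h2⟩
          rw [hget] at h2; exact hsp (by simpa using h2)
        rw [if_neg hcond]
        rw [hdrop, List.takeWhile_cons, if_neg (by simp [spaceP, hsp])]
        simp

lemma leftLoop_eq (cs : List Char) :
    transLeftLoop cs 0 ((cs.length : Int) - 1) = ((cs.takeWhile spaceP).length : Int) := by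
  have := leftLoop_eq_aux cs.length cs 0 (by omega)
  simpa using this

lemma rightLoop_eq' (cs : List Char) : ∀ (k : Nat), k ≤ cs.length →
    transRightLoop cs ((k : Int) - 1)
      = (k : Int) - 1 - ((((cs.take k).reverse).takeWhile spaceP).length : Int) := by
  intro k
  induction k with
  | zero =>
    intro _
    rw [transRightLoop]
    rw [if_neg (by intro ⟨h, _⟩; omega)]
    simp
  | succ k ih =>
    intro hk
    have hklen : k < cs.length := by omega
    have hget : PySem.List.pyGet? cs (((k + 1 : Nat) : Int) - 1) = some cs[k] := by
      have : (((k + 1 : Nat) : Int) - 1) = ((k : Nat) : Int) := by push_cast; omega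
      rw [this]; exact PySem.List.pyGet?_ofNat _ _ hklen
    have htake : (cs.take (k + 1)).reverse = cs[k] :: (cs.take k).reverse := by
      rw [List.take_add_one, List.getElem?_eq_getElem hklen]
      simp
    rw [transRightLoop]
    by_cases hsp : cs[k] = ' '
    · rw [if_pos ⟨by push_cast; omega, by rw [hget]; simpa using hsp⟩]
      have : (((k + 1 : Nat) : Int) - 1 - 1) = ((k : Nat) : Int) - 1 := by push_cast; omega
      rw [this, ih (by omega)]
      rw [htake, List.takeWhile_cons, if_pos (by simp [spaceP, hsp])]
      simp only [List.length_cons]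
      push_cast; omega
    · rw [if_neg (by intro ⟨_, h2⟩; rw [hget] at h2; exact hsp (by simpa using h2))]
      rw [htake, List.takeWhile_cons, if_neg (by simp [spaceP, hsp])]
      simp

lemma rightLoop_eq (cs : List Char) :
    transRightLoop cs ((cs.length : Int) - 1)
      = (cs.length : Int) - 1 - ((cs.reverse.takeWhile spaceP).length : Int) := by
  have := rightLoop_eq' cs cs.length (le_refl _)
  simpa using this

lemma takeWhile_eq_replicate_space (xs : List Char) :
    xs.takeWhile spaceP = List.replicate (xs.takeWhile spaceP).length ' ' := by
  apply List.eq_replicate_of_mem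
  intro c hc
  have := List.mem_takeWhile_imp hc
  simpa [spaceP] using this

lemma takeWhile_append_of_dropWhile_ne {xs ys : List Char}
    (h : xs.dropWhile spaceP ≠ []) :
    (xs ++ ys).takeWhile spaceP = xs.takeWhile spaceP := by
  induction xs with
  | nil => simp [List.dropWhile] at h
  | cons x t ih =>
    by_cases hx : spaceP x
    · rw [List.dropWhile_cons, if_pos hx] at h
      simp [hx, ih h]
    · simp [hx]

lemma dropWhile_rev_dropWhile_ne (xs : List Char) (h : xs.dropWhile spaceP ≠ []) :
    (xs.dropWhile spaceP).reverse.dropWhile spaceP ≠ [] := by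
  intro hnil
  have hall := List.dropWhile_eq_nil_iff.1 hnil
  have hhead := List.head_dropWhile_not spaceP h
  have hmem := hall ((xs.dropWhile spaceP).head h)
    (by rw [List.mem_reverse]; exact List.head_mem h)
  rw [hmem] at hhead
  simp at hhead

lemma no_nul_of_dom (row : String) (h : Dom_trans_part row) :
    ∀ c ∈ row.toList, c ≠ Char.ofNat 0 := by
  intro c hc hcc
  unfold Dom_trans_part pvDomStr at h
  rw [List.all_eq_true] at h
  have h2 := h c hc
  rw [hcc] at h2
  simp [pvDomChar] at h2

-- ===== VERDICT (by name: the statement is the Claim_ definition above) =====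
theorem trans_part_spec : Claim_equal_trans_part := by
  intro row hdom
  unfold Spec_trans_part trans_part trans_part_alt
  dsimp only
  set cs := row.toList with hcs
  have hnul : ∀ c ∈ cs, c ≠ Char.ofNat 0 := no_nul_of_dom row hdom
  set L : Nat := (cs.takeWhile spaceP).length with hL
  have hsplit : cs.takeWhile spaceP ++ cs.dropWhile spaceP = cs := List.takeWhile_append_dropWhile
  have hpre : cs.takeWhile spaceP = List.replicate L ' ' := takeWhile_eq_replicate_space cs
  have hlenLD : L + (cs.dropWhile spaceP).length = cs.length := by
    have h1 := congrArg List.length hsplit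
    rw [List.length_append, ← hL] at h1
    exact h1
  rw [fold_eq_emitA _ _ cs hnul 0 [], leftLoop_eq, rightLoop_eq, ← hL]
  simp only [List.nil_append]
  congr 1
  by_cases hD : cs.dropWhile spaceP = []
  · -- all spaces (or empty): everything is emitted unchanged
    have hcs_rep : cs = List.replicate L ' ' := by
      rw [← hsplit, hD, List.append_nil, hpre]
    have hLlen : L = cs.length := by
      rw [hD] at hlenLD; simpa using hlenLD
    have hrev : (cs.reverse.takeWhile spaceP).length = cs.length := by
      rw [hcs_rep]
      simp [spaceP]
    rw [hrev, hD]
    rw [emitA_id_right _ _ cs 0 (by omega)]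
    rw [hcs_rep]
    simp
  · -- general case: leading spaces ++ core ++ trailing spaces
    set D := cs.dropWhile spaceP with hDdef
    have hdropRD : D.reverse.dropWhile spaceP ≠ [] := dropWhile_rev_dropWhile_ne cs hD
    set core := (D.reverse.dropWhile spaceP).reverse with hcoredef
    set T : Nat := (D.reverse.takeWhile spaceP).length with hTdef
    have hsufrep : D.reverse.takeWhile spaceP = List.replicate T ' ' :=
      takeWhile_eq_replicate_space _
    have hDsplit : D = core ++ List.replicate T ' ' := by
      conv_lhs => rw [← List.reverse_reverse D,
        ← List.takeWhile_append_dropWhile (p := spaceP) (l := D.reverse)]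
      rw [List.reverse_append, hsufrep, List.reverse_replicate]
    have hDlen : D.length = core.length + T := by
      have h1 := congrArg List.length hDsplit
      simpa using h1
    have hrevlen : (cs.reverse.takeWhile spaceP).length = T := by
      have hcsrev : cs.reverse = D.reverse ++ (cs.takeWhile spaceP).reverse := by
        conv_lhs => rw [← hsplit]
        rw [List.reverse_append]
      rw [hcsrev, takeWhile_append_of_dropWhile_ne hdropRD, hTdef]
    rw [hrevlen]
    have hcs_decomp : cs = List.replicate L ' ' ++ (core ++ List.replicate T ' ') := by
      conv_lhs => rw [← hsplit]
      rw [hpre, hDsplit]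
    have hA : emitA (↑L) ((cs.length : Int) - 1 - (T : Int)) 0 cs
        = List.replicate L ' ' ++ (core.map (fun c => if c == ' ' then 'e' else c)
            ++ List.replicate T ' ') := by
      conv_lhs => rw [hcs_decomp]
      rw [emitA_append, emitA_append]
      rw [emitA_id_left _ _ _ 0 (by simp)]
      rw [emitA_map _ _ core _ (by simp)
        (by simp only [List.length_replicate, List.length_append]; push_cast; omega)]
      rw [emitA_id_right _ _ _ _
        (by simp only [List.length_replicate, List.length_append]; push_cast; omega)]
    rw [hA]
    have hL' : cs.length - D.length = L := by omega
    have hT' : cs.length - L - core.length = T := by omega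
    rw [hL', hT']
    exact (List.append_assoc _ _ _).symm
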